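-- pv_equiv track=rewrite | github.com/Nayan-09/Machine_learning | lab_2_17.12.2024/bidirection_dfs.py | dfs
-- ===== SOURCE A (Python) =====
-- def dfs(graph, node, visited, parents, target, found):
--     """
--     Helper DFS function to traverse graph and track parents.
--     """
--     if node in visited:
--         return False
--     visited.add(node)
--
--     # Stop if we find the target during traversal
--     if node == target:
--         found[0] = True
--         return True
--
--     for neighbor in graph[node]:
--         if neighbor not in visited:
--             parents[neighbor] = node  # Track parent for path reconstruction
--             if dfs(graph, neighbor, visited, parents, target, found):
--                 return True
--     return False
-- ===== SOURCE B (Python) =====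
-- def dfs(graph, node, visited, parents, target, found):
--     """
--     Iterative DFS (explicit stack of frames simulating the call stack),
--     tracking parents; same traversal order and mutations as the recursive version.
--     """
--     if node in visited:
--         return False
--     visited.add(node)
--     if node == target:
--         found[0] = True
--         return True
--     stack = [(node, iter(graph[node]))]
--     while stack:
--         cur, it = stack[-1]
--         advanced = False
--         for neighbor in it:
--             if neighbor not in visited:
--                 parents[neighbor] = cur
--                 visited.add(neighbor)
--                 if neighbor == target:
--                     found[0] = True
--                     return True
--                 stack.append((neighbor, iter(graph[neighbor])))
--                 advanced = True
--                 break
--         if not advanced: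
--             stack.pop()
--     return False
-- ===== Notes on version B (the rewrite author's own statement) =====
-- stated objective: alternative
-- what changed: The recursion is replaced by an iterative DFS with an explicit stack of (node, remaining-neighbors) frames simulating the call stack, preserving preorder traversal and all mutations of visited/parents/found.
-- outside the precondition, e.g. on dfs({'a': ['b', 'c']}, 'a', set(), {}, 'b', [False]): A returns True, B returns True; on dfs({'a': ['b'], 'b': []}, 'a', {'b'}, {}, 'b', []): A returns False, B returns False
import Mathlib
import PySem

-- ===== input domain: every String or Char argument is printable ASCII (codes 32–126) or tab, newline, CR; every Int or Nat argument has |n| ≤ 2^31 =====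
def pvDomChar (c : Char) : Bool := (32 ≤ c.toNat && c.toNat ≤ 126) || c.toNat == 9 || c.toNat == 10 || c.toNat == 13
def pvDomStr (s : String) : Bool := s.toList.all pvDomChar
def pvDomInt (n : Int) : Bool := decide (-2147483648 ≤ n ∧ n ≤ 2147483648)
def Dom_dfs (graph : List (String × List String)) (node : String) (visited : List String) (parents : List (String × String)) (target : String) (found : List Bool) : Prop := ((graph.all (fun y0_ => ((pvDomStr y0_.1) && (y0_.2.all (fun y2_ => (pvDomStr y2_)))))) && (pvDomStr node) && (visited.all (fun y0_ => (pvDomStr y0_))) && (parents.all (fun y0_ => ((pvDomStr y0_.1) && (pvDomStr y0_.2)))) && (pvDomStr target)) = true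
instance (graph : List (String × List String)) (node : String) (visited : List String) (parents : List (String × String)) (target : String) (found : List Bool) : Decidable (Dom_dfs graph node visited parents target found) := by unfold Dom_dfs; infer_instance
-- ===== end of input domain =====

-- B replaces the recursion by an explicit stack of (node, remaining-neighbors) frames,
-- simulating the call stack iteratively (same preorder traversal, same mutations of
-- visited/parents/found in Python); the equivalence proved here is about the return value.
-- Both ports thread the visited set and model a Python exception (KeyError on a missing
-- graph key, IndexError on found[0] with found = []) as `none`, propagated identically;
-- the raising inputs are excluded by Pre_dfs. parents never influences the return value
-- and is not threaded in the ports.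

-- helper: counting filter lemmas for the termination measure
theorem pvFilterLenMono {a : Type} (l : List a) (p q : a -> Bool)
    (h : forall x, x ∈ l -> q x = true -> p x = true) :
    (l.filter q).length ≤ (l.filter p).length := by
  induction l with
  | nil => simp
  | cons b t ih =>
    have ht := ih (fun x hx => h x (List.mem_cons_of_mem _ hx))
    by_cases hq : q b = true
    · have hp := h b (List.mem_cons_self) hq
      simp [hq, hp]; omega
    · simp only [Bool.not_eq_true] at hq
      by_cases hp : p b = true <;> simp [hq, hp] <;> omega

theorem pvFilterLenLt {a : Type} (l : List a) (p q : a -> Bool)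
    (h : forall x, x ∈ l -> q x = true -> p x = true)
    (x : a) (hx : x ∈ l) (hpx : p x = true) (hqx : q x = false) :
    (l.filter q).length < (l.filter p).length := by
  induction l with
  | nil => simp at hx
  | cons b t ih =>
    have hmono := pvFilterLenMono t p q (fun y hy => h y (List.mem_cons_of_mem _ hy))
    rcases List.mem_cons.mp hx with rfl | hxt
    · simp [hpx, hqx]; omega
    · have hlt := ih (fun y hy => h y (List.mem_cons_of_mem _ hy)) hxt
      by_cases hq : q b = true
      · have hp := h b (List.mem_cons_self) hq
        simp [hq, hp]; omega
      · simp only [Bool.not_eq_true] at hq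
        by_cases hp : p b = true <;> simp [hq, hp] <;> omega

-- number of graph keys not yet visited: the termination measure of the traversal
def pvCnt (g : PySem.Dict String (List String)) (visited : PySem.Set String) : Nat :=
  (g.keys.filter (fun k => !(PySem.Set.contains visited k))).length

theorem pvCnt_add_le (g : PySem.Dict String (List String)) (visited : PySem.Set String) (x : String) :
    pvCnt g (PySem.Set.add visited x) ≤ pvCnt g visited := by
  unfold pvCnt
  apply pvFilterLenMono
  intro k _ hk
  simp only [PySem.Set.contains_eq_listContains, List.contains_eq_mem,
    Bool.not_eq_eq_eq_not, Bool.not_true, decide_eq_false_iff_not, PySem.Set.mem_add] at *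
  tauto

theorem pvCnt_add_lt (g : PySem.Dict String (List String)) (visited : PySem.Set String) (x : String)
    (hx : x ∈ g.keys) (hnv : PySem.Set.contains visited x = false) :
    pvCnt g (PySem.Set.add visited x) < pvCnt g visited := by
  unfold pvCnt
  apply pvFilterLenLt _ _ _ ?_ x hx ?_ ?_
  · intro k _ hk
    simp only [PySem.Set.contains_eq_listContains, List.contains_eq_mem,
      Bool.not_eq_eq_eq_not, Bool.not_true, decide_eq_false_iff_not, PySem.Set.mem_add] at *
    tauto
  · simpa using hnv
  · simp [PySem.Set.mem_add]

theorem pvKeyOfGet (g : PySem.Dict String (List String)) (n : String) (l : List String)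
    (hg : g.get? n = some l) : n ∈ g.keys := by
  have h2 : g.contains n = true := by
    rw [PySem.Dict.contains_eq_isSome_get?, hg]; rfl
  exact (PySem.Dict.contains_iff_mem_keys g n).mp h2

-- ===== PORT A =====
-- literal port of A's recursion; the Bool result is an Option Bool with none = a Python
-- exception (KeyError on graph[node], IndexError on found[0] with found = []) propagating
-- out of the call; the result carries the invariant `pvCnt … ≤ pvCnt … visited` needed
-- for the well-founded recursion.
mutual
def dfsCore (g : PySem.Dict String (List String)) (target : String) (found : List Bool)
    (node : String) (visited : PySem.Set String) :
    {p : Option Bool × PySem.Set String // pvCnt g p.2 ≤ pvCnt g visited} :=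
  if hv : PySem.Set.contains visited node then
    ⟨(some false, visited), le_refl _⟩
  else
    -- visited.add(node)
    let v1 := PySem.Set.add visited node
    if node == target then
      -- found[0] = True : IndexError if found == []
      if found.isEmpty then ⟨(none, v1), pvCnt_add_le _ _ _⟩
      else ⟨(some true, v1), pvCnt_add_le _ _ _⟩
    else
      match hg : g.get? node with
      | none => ⟨(none, v1), pvCnt_add_le _ _ _⟩   -- KeyError on graph[node]
      | some ns =>
        let p := dfsGo g target found ns v1
        ⟨p.val, le_trans p.property (pvCnt_add_le _ _ _)⟩
  termination_by (pvCnt g visited, 0)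
  decreasing_by
    exact Prod.Lex.left _ _ (pvCnt_add_lt g visited node (pvKeyOfGet g node ns hg) (by simpa using hv))
def dfsGo (g : PySem.Dict String (List String)) (target : String) (found : List Bool)
    (ns : List String) (visited : PySem.Set String) :
    {p : Option Bool × PySem.Set String // pvCnt g p.2 ≤ pvCnt g visited} :=
  match ns with
  | [] => ⟨(some false, visited), le_refl _⟩
  | n :: rest =>
    if PySem.Set.contains visited n then dfsGo g target found rest visited
    else
      -- parents[n] = node (no effect on the return value), then the recursive call
      let p := dfsCore g target found n visited
      match p.val.1 with
      | none => ⟨(none, p.val.2), p.property⟩      -- exception propagates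
      | some true => ⟨(some true, p.val.2), p.property⟩
      | some false =>
        let q := dfsGo g target found rest p.val.2
        ⟨q.val, le_trans q.property p.property⟩
  termination_by (pvCnt g visited, ns.length + 1)
  decreasing_by
    · exact Prod.Lex.right _ (by simp only [List.length_cons]; omega)
    · exact Prod.Lex.right _ (by omega)
    · rcases lt_or_eq_of_le p.property with h | h
      · exact Prod.Lex.left _ _ h
      · rw [h]; exact Prod.Lex.right _ (by simp only [List.length_cons]; omega)
end

def dfs (graph : List (String × List String)) (node : String) (visited : List String) (parents : List (String × String)) (target : String) (found : List Bool) : Bool :=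
  match (dfsCore (PySem.Dict.ofList graph) target found node (PySem.Set.ofList visited)).val.1 with
  | some b => b
  | none => false   -- unreachable under Pre_dfs (Python raises there)

-- ===== PORT B =====
-- literal port of B's loop: an explicit stack of (node, remaining-neighbors) frames;
-- none = a Python exception (KeyError / IndexError on found[0]), returned where B raises.
def dfsLoop (g : PySem.Dict String (List String)) (target : String) (found : List Bool)
    (stack : List (String × List String)) (visited : PySem.Set String) : Option Bool :=
  match stack with
  | [] => some false
  | (_cur, []) :: rest => dfsLoop g target found rest visited      -- frame exhausted: pop
  | (cur, n :: ns') :: rest =>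
    if hv : PySem.Set.contains visited n then
      dfsLoop g target found ((cur, ns') :: rest) visited          -- skip visited neighbor
    else
      -- parents[n] = cur; visited.add(n)
      let v1 := PySem.Set.add visited n
      if n == target then
        if found.isEmpty then none else some true                  -- found[0] = True; return True
      else
        match hg : g.get? n with
        | none => none                                             -- KeyError on graph[n]
        | some l => dfsLoop g target found ((n, l) :: (cur, ns') :: rest) v1
  termination_by (pvCnt g visited, (stack.map (fun f => f.2.length + 1)).sum)
  decreasing_by
    · exact Prod.Lex.right _ (by simp)
    · exact Prod.Lex.right _ (by simp)
    · exact Prod.Lex.left _ _ (pvCnt_add_lt g visited n (pvKeyOfGet g n l hg) (by simpa using hv))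

def dfs_alt (graph : List (String × List String)) (node : String) (visited : List String) (parents : List (String × String)) (target : String) (found : List Bool) : Bool :=
  let g := PySem.Dict.ofList graph
  let vs := PySem.Set.ofList visited
  if PySem.Set.contains vs node then false
  else
    let v1 := PySem.Set.add vs node
    if node == target then
      match (if found.isEmpty then (none : Option Bool) else some true) with
      | some b => b
      | none => false   -- IndexError in Python; unreachable under Pre_dfs
    else
      match g.get? node with
      | none => false   -- KeyError in Python; unreachable under Pre_dfs
      | some ns =>
        match dfsLoop g target found [(node, ns)] v1 with
        | some b => b
        | none => false

-- ===== PRECONDITION & SPEC =====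
-- Pre_dfs excludes the inputs on which the Python raises (KeyError when a missing graph key
-- is entered, IndexError on found[0] = True with found = []); it is stated in closed form and
-- is conservative: it also excludes some inputs where the dangerous node/neighbor is never
-- entered (e.g. a missing-key neighbor equal to target, or found = [] with target unreachable
-- only because it is in visited) — on those A still returns; see the cites in claim.json.
def Pre_dfs (graph : List (String × List String)) (node : String) (visited : List String) (parents : List (String × String)) (target : String) (found : List Bool) : Prop :=
  node ∈ visited ∨
    ((node = target ∨ node ∈ graph.map Prod.fst) ∧
     (∀ p ∈ graph, ∀ x ∈ p.2, x ∈ graph.map Prod.fst ∨ x = target ∨ x ∈ visited) ∧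
     (found ≠ [] ∨ (node ≠ target ∧ ∀ p ∈ graph, target ∉ p.2)))
instance (graph : List (String × List String)) (node : String) (visited : List String) (parents : List (String × String)) (target : String) (found : List Bool) : Decidable (Pre_dfs graph node visited parents target found) := by unfold Pre_dfs; infer_instance

def pvWitness_dfs : (List (String × List String)) × String × List String × (List (String × String)) × String × List Bool :=
  ([("a", ["b", "c"]), ("b", []), ("c", [])], "a", [], [], "c", [false])

def Spec_dfs (graph : List (String × List String)) (node : String) (visited : List String) (parents : List (String × String)) (target : String) (found : List Bool) (out : Bool) : Prop := out = dfs_alt graph node visited parents target found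
instance (graph : List (String × List String)) (node : String) (visited : List String) (parents : List (String × String)) (target : String) (found : List Bool) (out : Bool) : Decidable (Spec_dfs graph node visited parents target found out) := by unfold Spec_dfs; infer_instance

-- ===== CLAIM (what is proved, stated in full; the proofs are below) =====
def Claim_equal_dfs : Prop := ∀ (graph : List (String × List String)) (node : String) (visited : List String) (parents : List (String × String)) (target : String) (found : List Bool), Dom_dfs graph node visited parents target found → Pre_dfs graph node visited parents target found → Spec_dfs graph node visited parents target found (dfs graph node visited parents target found)

-- ===== LEMMAS AND PROOFS =====

theorem loop_eq_go_aux (g : PySem.Dict String (List String)) (target : String) (found : List Bool) :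
    ∀ (c : Nat) (visited : PySem.Set String), pvCnt g visited ≤ c →
      ∀ (ns : List String) (cur : String) (rest : List (String × List String)),
      dfsLoop g target found ((cur, ns) :: rest) visited =
        match (dfsGo g target found ns visited).val.1 with
        | none => none
        | some true => some true
        | some false => dfsLoop g target found rest (dfsGo g target found ns visited).val.2 := by
  intro c
  induction c using Nat.strong_induction_on with
  | _ c IH =>
    intro visited hvc ns
    induction ns with
    | nil =>
      intro cur rest
      rw [dfsLoop.eq_def, dfsGo.eq_def]
    | cons n rest' ihns =>
      intro cur rest
      rw [dfsLoop.eq_def]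
      rw [show dfsGo g target found (n :: rest') visited =
        (if PySem.Set.contains visited n then dfsGo g target found rest' visited
         else
          let p := dfsCore g target found n visited
          match p.val.1 with
          | none => ⟨(none, p.val.2), p.property⟩
          | some true => ⟨(some true, p.val.2), p.property⟩
          | some false =>
            let q := dfsGo g target found rest' p.val.2
            ⟨q.val, le_trans q.property p.property⟩) from by rw [dfsGo.eq_def]]
      by_cases hv : PySem.Set.contains visited n
      · simp only [hv, if_true, dif_pos]
        exact ihns cur rest
      · simp only [hv, Bool.false_eq_true, if_false, dif_neg, not_false_iff]
        rw [dfsCore.eq_def]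
        simp only [hv, Bool.false_eq_true, dif_neg, not_false_iff]
        by_cases ht : (n == target) = true
        · by_cases hf : found.isEmpty = true
          · simp [ht, hf]
          · simp [ht, hf]
        · cases hg : g.get? n with
          | none => simp [ht]
          | some l =>
            simp only [ht, Bool.false_eq_true, if_false]
            have hlt : pvCnt g (PySem.Set.add visited n) < pvCnt g visited :=
              pvCnt_add_lt g visited n (pvKeyOfGet g n l hg) (by simpa using hv)
            rw [IH (pvCnt g (PySem.Set.add visited n)) (lt_of_lt_of_le hlt hvc) _ (le_refl _) l n ((cur, rest') :: rest)]
            cases hq : (dfsGo g target found l (PySem.Set.add visited n)).val.1 with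
            | none => simp
            | some b =>
              cases b with
              | true => simp
              | false =>
                simp only [hq]
                have hle2 : pvCnt g (dfsGo g target found l (PySem.Set.add visited n)).val.2 ≤ pvCnt g (PySem.Set.add visited n) :=
                  (dfsGo g target found l (PySem.Set.add visited n)).property
                rw [IH (pvCnt g (dfsGo g target found l (PySem.Set.add visited n)).val.2)
                      (lt_of_le_of_lt hle2 (lt_of_lt_of_le hlt hvc)) _ (le_refl _) rest' cur rest]
                have hv2 : List.contains visited n = false := by simpa using hv
                rw [dif_neg (by simpa [List.contains_eq_mem] using hv2), if_neg ht]

-- The bridge: running B's loop with a top frame (cur, ns) is exactly running A's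
-- neighbor loop (dfsGo) on ns, then continuing with the rest of the stack.
theorem loop_eq_go (g : PySem.Dict String (List String)) (target : String) (found : List Bool) :
    ∀ (visited : PySem.Set String) (ns : List String) (cur : String) (rest : List (String × List String)),
      dfsLoop g target found ((cur, ns) :: rest) visited =
        match (dfsGo g target found ns visited).val.1 with
        | none => none
        | some true => some true
        | some false => dfsLoop g target found rest (dfsGo g target found ns visited).val.2 :=
  fun visited ns cur rest =>
    loop_eq_go_aux g target found (pvCnt g visited) visited (le_refl _) ns cur rest

-- ===== VERDICT =====
theorem dfs_spec : Claim_equal_dfs := by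
  unfold Claim_equal_dfs
  intro graph node visited parents target found _hdom _hpre
  unfold Spec_dfs dfs dfs_alt
  rw [dfsCore.eq_def]
  by_cases hv : PySem.Set.contains (PySem.Set.ofList visited) node
  · have hm : node ∈ visited := by simpa using hv
    simp [hm]
  · rw [dif_neg (by simpa using hv)]
    simp only [hv, Bool.false_eq_true, if_false]
    by_cases ht : (node == target) = true
    · by_cases hf : found.isEmpty = true <;> simp [ht, hf]
    · cases hg : (PySem.Dict.ofList graph).get? node with
      | none => simp [ht]
      | some ns =>
        simp only [ht, Bool.false_eq_true, if_false]
        rw [loop_eq_go]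
        cases hq : (dfsGo (PySem.Dict.ofList graph) target found ns
            (PySem.Set.add (PySem.Set.ofList visited) node)).val.1 with
        | none => simp
        | some b =>
          cases b with
          | true => simp
          | false => simp; rw [dfsLoop.eq_def]
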